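-- pv_equiv track=rewrite | github.com/tenick/cp | Algolympics/2020/code solutions/supper/solution3_kevin.py | compute_inverses
-- ===== SOURCE A (Python) =====
-- mod = 104857601
--
-- def compute_inverses(n):
--     """ compute inverses up to n """
--     inv = [1]*(n+1)
--
--     # compute n!
--     for i in range(1,n+1): inv[n] = inv[n] * i % mod
--
--     # compute (n!)^-1
--     inv[n] = pow(inv[n], mod - 2, mod)
--
--     # compute inverse factorials (i!)^-1 as (i-1)!^-1 = i*i!^-1
--     for i in range(n,0,-1): inv[i - 1] = inv[i] * i % mod
--
--     # compute i^-1 as (i!)^-1 * (i-1)!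
--     f = 1
--     for i in range(1,n+1):
--         inv[i] = inv[i] * f % mod
--         f = f * i % mod
--
--     return inv
-- ===== SOURCE B (Python) =====
-- mod = 104857601
--
-- def compute_inverses(n):
--     """ compute inverses up to n """
--     # standard linear recurrence for modular inverses: no factorials, no pow
--     inv = [1] * (n + 1)
--     for i in range(2, n + 1):
--         inv[i] = (mod - mod // i) * inv[mod % i] % mod
--     return inv
-- ===== Notes on version B (the rewrite author's own statement) =====
-- stated objective: alternative
-- what changed: Replaces A's factorial/Fermat pipeline (accumulate n!, one modular exponentiation, unroll inverse factorials backwards, then a forward fix-up pass) with the standard single-pass linear inverse recurrence inv[i] = (mod - mod // i) * inv[mod % i] % mod.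
import Mathlib
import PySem

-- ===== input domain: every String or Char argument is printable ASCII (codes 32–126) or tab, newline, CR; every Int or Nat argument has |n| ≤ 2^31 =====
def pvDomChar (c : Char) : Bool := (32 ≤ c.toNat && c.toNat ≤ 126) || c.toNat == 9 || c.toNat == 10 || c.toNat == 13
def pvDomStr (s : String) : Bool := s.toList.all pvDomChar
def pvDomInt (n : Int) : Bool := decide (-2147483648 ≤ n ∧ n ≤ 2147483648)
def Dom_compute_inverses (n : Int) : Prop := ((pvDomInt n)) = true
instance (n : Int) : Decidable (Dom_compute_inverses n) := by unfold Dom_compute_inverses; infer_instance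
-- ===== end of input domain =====

-- B replaces A's factorial/Fermat pipeline (factorial product, one modular exponentiation,
-- inverse factorials unrolled backwards, then a fix-up pass) with the standard linear
-- inverse recurrence inv[i] = (mod - mod // i) * inv[mod % i] % mod (objective: alternative).

-- ===== PORT A =====
-- module constant 'mod' of the Python file
def pvMod : Int := 104857601

-- pow(b, e, m): Python's three-argument pow, ported step for step as the binary
-- square-and-multiply CPython performs; exact for m > 0 (A calls it with m = mod)
def pvPowMod (b : Int) (e : Nat) (m : Int) : Int :=
  if h : e = 0 then PySem.Int.mod 1 m
  else
    let t := pvPowMod b (e / 2) m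
    if e % 2 = 0 then PySem.Int.mod (t * t) m
    else PySem.Int.mod (PySem.Int.mod (t * t) m * b) m
  termination_by e
  decreasing_by exact Nat.div_lt_self (Nat.pos_of_ne_zero h) one_lt_two

def compute_inverses (n : Int) : List Int :=
  let inv0 := PySem.List.pyRepeat [(1 : Int)] (n + 1)
  let inv1 := (PySem.List.pyRange 1 (n + 1) 1).foldl
    (fun l i => PySem.List.pySetD l n (PySem.Int.mod (PySem.List.pyGetD l n 0 * i) pvMod)) inv0
  let inv2 := PySem.List.pySetD inv1 n
    (pvPowMod (PySem.List.pyGetD inv1 n 0) (104857601 - 2) pvMod)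
  let inv3 := (PySem.List.pyRange n 0 (-1)).foldl
    (fun l i => PySem.List.pySetD l (i - 1) (PySem.Int.mod (PySem.List.pyGetD l i 0 * i) pvMod)) inv2
  let s := (PySem.List.pyRange 1 (n + 1) 1).foldl
    (fun s i => (PySem.List.pySetD s.1 i (PySem.Int.mod (PySem.List.pyGetD s.1 i 0 * s.2) pvMod),
                 PySem.Int.mod (s.2 * i) pvMod)) (inv3, 1)
  s.1

-- ===== PORT B =====
def compute_inverses_alt (n : Int) : List Int :=
  let inv0 := PySem.List.pyRepeat [(1 : Int)] (n + 1)
  (PySem.List.pyRange 2 (n + 1) 1).foldl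
    (fun l i => PySem.List.pySetD l i
      (PySem.Int.mod ((pvMod - PySem.Int.floordiv pvMod i) * PySem.List.pyGetD l (PySem.Int.mod pvMod i) 0) pvMod)) inv0

-- ===== PRECONDITION & SPEC =====
-- A raises IndexError on every negative n ([1]*(n+1) is the empty list there).  Pre_ also
-- excludes n ≥ mod, where n! ≡ 0 (mod mod) makes A return a degenerate all-zero list: the
-- inverses of multiples of mod do not exist, so no output is specified there and B's
-- recurrence values are a different (equally unspecifiable) answer.
def Pre_compute_inverses (n : Int) : Prop := 0 ≤ n ∧ n < 104857601
instance (n : Int) : Decidable (Pre_compute_inverses n) := by unfold Pre_compute_inverses; infer_instance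
def pvWitness_compute_inverses : Int := 3

def Spec_compute_inverses (n : Int) (out : List Int) : Prop := out = compute_inverses_alt n
instance (n : Int) (out : List Int) : Decidable (Spec_compute_inverses n out) := by unfold Spec_compute_inverses; infer_instance

-- ===== CLAIM (what is proved, stated in full; the proofs are below) =====
def Claim_equal_compute_inverses : Prop := ∀ (n : Int), Dom_compute_inverses n → Pre_compute_inverses n → Spec_compute_inverses n (compute_inverses n)

-- ===== LEMMAS AND PROOFS =====

-- ---- canonical forms of A's four passes (proof-only definitions) ----

-- factorial chain mod pvMod: fmChain k = k! % pvMod exactly as A's first loop accumulates it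
def fmChain : Nat → Int
  | 0 => 1
  | k + 1 => PySem.Int.mod (fmChain k * ((k : Int) + 1)) pvMod

-- inverse-factorial chain, counted DOWN from n: gvChain n j = value after j backward steps
def gvChain (n : Nat) : Nat → Int
  | 0 => pvPowMod (fmChain n) (104857601 - 2) pvMod
  | j + 1 => PySem.Int.mod (gvChain n j * ((n : Int) - (j : Int))) pvMod

-- A's array after the backward pass has run down to j+1 (slots < j still untouched)
def midL (n j : Nat) : List Int :=
  (List.range (n + 1)).map (fun k => if k < j then 1 else gvChain n (n - k))

-- A's array after the forward pass has fixed slots 1..j; finL n n is A's final value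
def finL (n j : Nat) : List Int :=
  (List.range (n + 1)).map (fun k =>
    if 1 ≤ k ∧ k ≤ j then PySem.Int.mod (gvChain n (n - k) * fmChain (k - 1)) pvMod
    else gvChain n (n - k))

-- ---- canonical form of B's recurrence ----

-- bInv k = the value B's loop writes into slot k (slots 0 and 1 keep their initial 1)
def bInv : Nat → Int
  | 0 => 1
  | 1 => 1
  | (i + 2) => PySem.Int.mod
      ((pvMod - ((104857601 / (i + 2) : Nat) : Int)) * bInv (104857601 % (i + 2))) pvMod
  termination_by k => k
  decreasing_by exact Nat.mod_lt _ (by omega)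

lemma bInv_ge_two (k : Nat) (hk : 2 ≤ k) :
    bInv k = PySem.Int.mod
      ((pvMod - ((104857601 / k : Nat) : Int)) * bInv (104857601 % k)) pvMod := by
  match k, hk with
  | (i + 2), _ => rw [bInv]

-- B's array after the loop has processed i = 2..j
def pList (m j : Nat) : List Int :=
  (List.range (m + 1)).map (fun k => if k ≤ j then bInv k else 1)

-- ---- A-side loop characterisations ----

lemma stage1 (m : Nat) : ∀ j : Nat,
    (PySem.List.pyRange 1 ((j : Int) + 1) 1).foldl
      (fun l i => PySem.List.pySetD l (m : Int) (PySem.Int.mod (PySem.List.pyGetD l (m : Int) 0 * i) pvMod))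
      (List.replicate (m + 1) (1 : Int))
    = (List.replicate (m + 1) (1 : Int)).set m (fmChain j) := by
  intro j
  induction j with
  | zero =>
    simp only [Nat.cast_zero, zero_add]
    rw [PySem.List.pyRange_one_eq_nil le_rfl]
    simp [fmChain, List.set_replicate_self]
  | succ j ih =>
    have hcast : ((j + 1 : Nat) : Int) + 1 = ((j : Nat) : Int) + 1 + 1 := by push_cast; ring
    rw [hcast, PySem.List.pyRange_one_succ_right (by omega), List.foldl_append, ih]
    simp only [List.foldl_cons, List.foldl_nil]
    rw [PySem.List.pySetD_natCast, PySem.List.pyGetD_natCast,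
        List.getD_eq_getElem _ _ (by simp), List.getElem_set_self (by simp), List.set_set]
    have hv : PySem.Int.mod (fmChain j * ((j : Int) + 1)) pvMod = fmChain (j + 1) := by
      simp [fmChain]
    rw [hv]

lemma mid_init (m : Nat) :
    (List.replicate (m + 1) (1 : Int)).set m (gvChain m 0) = midL m m := by
  apply List.ext_getElem
  · simp [midL]
  · intro i h1 h2
    have hi : i < m + 1 := by simpa using h1
    simp only [midL, List.getElem_set, List.getElem_map, List.getElem_range, List.getElem_replicate]
    by_cases h : m = i
    · subst h
      rw [if_pos rfl, if_neg (by omega), Nat.sub_self]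
    · rw [if_neg h, if_pos (by omega)]

lemma stage3 (m : Nat) : ∀ j : Nat, j ≤ m →
    (PySem.List.pyRange (j : Int) 0 (-1)).foldl
      (fun l i => PySem.List.pySetD l (i - 1) (PySem.Int.mod (PySem.List.pyGetD l i 0 * i) pvMod))
      (midL m j)
    = midL m 0 := by
  intro j
  induction j with
  | zero =>
    intro _
    rw [PySem.List.pyRange_neg_one_eq_nil (by simp)]
    simp only [List.foldl_nil]
  | succ j ih =>
    intro hj
    rw [PySem.List.pyRange_neg_one_cons (by omega : (0 : Int) < ((j + 1 : Nat) : Int))]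
    simp only [List.foldl_cons]
    have h1 : ((j + 1 : Nat) : Int) - 1 = ((j : Nat) : Int) := by push_cast; ring
    rw [h1, PySem.List.pySetD_natCast, PySem.List.pyGetD_natCast,
        List.getD_eq_getElem _ _ (by simp [midL]; omega)]
    have hval : (midL m (j + 1))[j + 1]'(by simp [midL]; omega) = gvChain m (m - (j + 1)) := by
      simp [midL]
    rw [hval]
    have hstep : PySem.Int.mod (gvChain m (m - (j + 1)) * ((j + 1 : Nat) : Int)) pvMod
        = gvChain m (m - j) := by
      have h2 : m - j = (m - (j + 1)) + 1 := by omega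
      have h3 : ((m : Int) - ((m - (j + 1) : Nat) : Int)) = ((j + 1 : Nat) : Int) := by omega
      rw [h2]
      show _ = PySem.Int.mod (gvChain m (m - (j + 1)) * ((m : Int) - ((m - (j + 1) : Nat) : Int))) pvMod
      rw [h3]
    rw [hstep]
    have hset : (midL m (j + 1)).set j (gvChain m (m - j)) = midL m j := by
      apply List.ext_getElem
      · simp [midL]
      · intro i hA hB
        have hi : i < m + 1 := by simpa [midL] using hB
        simp only [midL, List.getElem_set, List.getElem_map, List.getElem_range]
        by_cases h : j = i
        · subst h; rw [if_pos rfl, if_neg (by omega)]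
        · rw [if_neg h]
          split_ifs <;> first | rfl | omega
    rw [hset]
    exact ih (by omega)

lemma stage4 (m : Nat) : ∀ j : Nat, j ≤ m →
    (PySem.List.pyRange 1 ((j : Int) + 1) 1).foldl
      (fun s i => (PySem.List.pySetD s.1 i (PySem.Int.mod (PySem.List.pyGetD s.1 i 0 * s.2) pvMod),
                   PySem.Int.mod (s.2 * i) pvMod))
      (midL m 0, 1)
    = (finL m j, fmChain j) := by
  intro j
  induction j with
  | zero =>
    intro _
    simp only [Nat.cast_zero, zero_add]
    rw [PySem.List.pyRange_one_eq_nil le_rfl]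
    simp only [List.foldl_nil]
    have : midL m 0 = finL m 0 := by
      unfold midL finL
      apply List.map_congr_left
      intro k _
      rw [if_neg (by omega), if_neg (by omega)]
    rw [this]
    rfl
  | succ j ih =>
    intro hj
    have hcast : ((j + 1 : Nat) : Int) + 1 = ((j : Nat) : Int) + 1 + 1 := by push_cast; ring
    rw [hcast, PySem.List.pyRange_one_succ_right (by omega), List.foldl_append, ih (by omega)]
    simp only [List.foldl_cons, List.foldl_nil]
    have h1 : ((j : Nat) : Int) + 1 = ((j + 1 : Nat) : Int) := by push_cast; ring
    rw [h1, PySem.List.pySetD_natCast, PySem.List.pyGetD_natCast,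
        List.getD_eq_getElem _ _ (by simp [finL]; omega)]
    have hval : (finL m j)[j + 1]'(by simp [finL]; omega) = gvChain m (m - (j + 1)) := by
      simp only [finL, List.getElem_map, List.getElem_range]
      rw [if_neg (by omega)]
    rw [hval]
    have hset : (finL m j).set (j + 1)
        (PySem.Int.mod (gvChain m (m - (j + 1)) * fmChain j) pvMod) = finL m (j + 1) := by
      apply List.ext_getElem
      · simp [finL]
      · intro i hA hB
        have hi : i < m + 1 := by simpa [finL] using hB
        simp only [finL, List.getElem_set, List.getElem_map, List.getElem_range]
        by_cases h : j + 1 = i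
        · subst h; rw [if_pos rfl, if_pos (by omega), Nat.add_sub_cancel]
        · rw [if_neg h]
          split_ifs with hc1 hc2
          · rfl
          · omega
          · omega
          · rfl
    have hsnd : PySem.Int.mod (fmChain j * ((j + 1 : Nat) : Int)) pvMod = fmChain (j + 1) := by
      have hc : ((j + 1 : Nat) : Int) = (j : Int) + 1 := by push_cast; ring
      rw [hc]
      simp [fmChain]
    rw [hset, hsnd]

lemma A_canon (m : Nat) : compute_inverses ((m : Nat) : Int) = finL m m := by
  simp only [compute_inverses]
  rw [PySem.List.pyRepeat_singleton]
  have htn : ((m : Int) + 1).toNat = m + 1 := by omega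
  rw [htn, stage1 m m, PySem.List.pySetD_natCast, PySem.List.pyGetD_natCast,
      List.getD_eq_getElem _ _ (by simp), List.getElem_set_self (by simp), List.set_set,
      show pvPowMod (fmChain m) (104857601 - 2) pvMod = gvChain m 0 from rfl,
      mid_init m, stage3 m m le_rfl, stage4 m m le_rfl]

-- ---- B-side loop characterisation ----

lemma bLoop (m : Nat) : ∀ j : Nat, 1 ≤ j → j ≤ m →
    (PySem.List.pyRange 2 ((j : Int) + 1) 1).foldl
      (fun l i => PySem.List.pySetD l i
        (PySem.Int.mod ((pvMod - PySem.Int.floordiv pvMod i) * PySem.List.pyGetD l (PySem.Int.mod pvMod i) 0) pvMod))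
      (List.replicate (m + 1) (1 : Int))
    = pList m j := by
  intro j
  induction j with
  | zero => intro h; omega
  | succ j ih =>
    intro _ hj
    by_cases hj1 : j = 0
    · subst hj1
      rw [show ((1 : Nat) : Int) + 1 = 2 from by norm_num,
          PySem.List.pyRange_one_eq_nil le_rfl]
      simp only [List.foldl_nil]
      apply List.ext_getElem
      · simp [pList]
      · intro i h1 h2
        have hi : i < m + 1 := by simpa using h1
        simp only [pList, List.getElem_replicate, List.getElem_map, List.getElem_range]
        rcases Nat.lt_or_ge i 2 with h | h
        · interval_cases i <;> simp [bInv]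
        · rw [if_neg (by omega)]
    · have hcast : ((j + 1 : Nat) : Int) + 1 = ((j : Nat) : Int) + 1 + 1 := by push_cast; ring
      rw [hcast, PySem.List.pyRange_one_succ_right (by omega), List.foldl_append,
          ih (by omega) (by omega)]
      simp only [List.foldl_cons, List.foldl_nil]
      have h1 : ((j : Nat) : Int) + 1 = ((j + 1 : Nat) : Int) := by push_cast; ring
      have hmodc : PySem.Int.mod pvMod ((j + 1 : Nat) : Int)
          = ((104857601 % (j + 1) : Nat) : Int) := by
        show PySem.Int.mod ((104857601 : Nat) : Int) ((j + 1 : Nat) : Int) = _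
        rw [PySem.Int.mod_natCast]
      have hdivc : PySem.Int.floordiv pvMod ((j + 1 : Nat) : Int)
          = ((104857601 / (j + 1) : Nat) : Int) := by
        show PySem.Int.floordiv ((104857601 : Nat) : Int) ((j + 1 : Nat) : Int) = _
        rw [PySem.Int.floordiv_natCast]
      rw [h1, hmodc, hdivc, PySem.List.pySetD_natCast, PySem.List.pyGetD_natCast]
      have hr : 104857601 % (j + 1) < j + 1 := Nat.mod_lt _ (by omega)
      have hget : (pList m j).getD (104857601 % (j + 1)) 0 = bInv (104857601 % (j + 1)) := by
        rw [List.getD_eq_getElem _ _ (by simp [pList]; omega)]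
        simp only [pList, List.getElem_map, List.getElem_range]
        rw [if_pos (by omega)]
      rw [hget, show PySem.Int.mod ((pvMod - ((104857601 / (j + 1) : Nat) : Int)) * bInv (104857601 % (j + 1))) pvMod
            = bInv (j + 1) from (bInv_ge_two (j + 1) (by omega)).symm]
      apply List.ext_getElem
      · simp [pList]
      · intro i hA hB
        have hi : i < m + 1 := by simpa [pList] using hB
        simp only [pList, List.getElem_set, List.getElem_map, List.getElem_range]
        by_cases h : j + 1 = i
        · subst h; rw [if_pos rfl, if_pos (by omega)]
        · rw [if_neg h]
          split_ifs <;> first | rfl | omega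

lemma B_canon (m : Nat) : compute_inverses_alt ((m : Nat) : Int) = (List.range (m + 1)).map bInv := by
  simp only [compute_inverses_alt]
  rw [PySem.List.pyRepeat_singleton]
  have htn : ((m : Int) + 1).toNat = m + 1 := by omega
  rw [htn]
  by_cases hm : m = 0
  · subst hm
    rw [show ((0 : Nat) : Int) + 1 = 1 from by norm_num,
        PySem.List.pyRange_one_eq_nil (by norm_num)]
    simp [bInv]
  · rw [bLoop m m (by omega) le_rfl]
    unfold pList
    apply List.map_congr_left
    intro k hk
    rw [if_pos (by simpa using Nat.lt_succ_iff.mp (List.mem_range.mp hk))]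

-- ---- number theory: both canonical forms list the modular inverses ----

lemma pvP_prime : Nat.Prime 104857601 := by norm_num

-- injectivity of the cast ℤ → ZMod 104857601 on [0, 104857601)
lemma castInj (x y : Int) (hx0 : 0 ≤ x) (hx : x < 104857601) (hy0 : 0 ≤ y) (hy : y < 104857601)
    (h : (x : ZMod 104857601) = (y : ZMod 104857601)) : x = y := by
  have h2 : x % ((104857601 : Nat) : Int) = y % ((104857601 : Nat) : Int) :=
    (ZMod.intCast_eq_intCast_iff x y 104857601).mp h
  rw [Int.emod_eq_of_lt hx0 (by exact_mod_cast hx), Int.emod_eq_of_lt hy0 (by exact_mod_cast hy)] at h2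
  exact h2

lemma mod_bounds (x : Int) : 0 ≤ PySem.Int.mod x 104857601 ∧ PySem.Int.mod x 104857601 < 104857601 := by
  rw [PySem.Int.mod_eq_emod_of_pos (by norm_num)]
  exact ⟨Int.emod_nonneg x (by norm_num), Int.emod_lt_of_pos x (by norm_num)⟩

lemma mod_castZ (x : Int) :
    ((PySem.Int.mod x 104857601 : Int) : ZMod 104857601) = (x : ZMod 104857601) := by
  rw [PySem.Int.mod_eq_emod_of_pos (by norm_num)]
  exact_mod_cast ZMod.intCast_mod x 104857601

lemma pvMod_bounds (x : Int) : 0 ≤ PySem.Int.mod x pvMod ∧ PySem.Int.mod x pvMod < 104857601 :=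
  mod_bounds x

lemma pvMod_castZ (x : Int) :
    ((PySem.Int.mod x pvMod : Int) : ZMod 104857601) = (x : ZMod 104857601) :=
  mod_castZ x

-- two elements with the same right inverse are equal (pure ring reasoning)
lemma uniq_inv (c x y : ZMod 104857601) (hx : x * c = 1) (hy : y * c = 1) : x = y := by
  calc x = x * (y * c) := by rw [hy, mul_one]
    _ = (x * c) * y := by ring
    _ = y := by rw [hx, one_mul]

lemma fact_ne_zero (k : Nat) (hk : k < 104857601) :
    ((Nat.factorial k : Nat) : ZMod 104857601) ≠ 0 := by
  rw [Ne, ZMod.natCast_eq_zero_iff]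
  intro hd
  have := (Nat.Prime.dvd_factorial pvP_prime).mp hd
  omega

lemma pow_spec (e : Nat) (b : Int) :
    (0 ≤ pvPowMod b e pvMod ∧ pvPowMod b e pvMod < 104857601) ∧
    ((pvPowMod b e pvMod : ZMod 104857601) = (b : ZMod 104857601) ^ e) := by
  induction e using Nat.strong_induction_on with
  | _ e ih =>
    by_cases h0 : e = 0
    · subst h0
      rw [pvPowMod, dif_pos rfl]
      refine ⟨pvMod_bounds 1, ?_⟩
      rw [pvMod_castZ]
      norm_num
    · rw [pvPowMod, dif_neg h0]
      simp only []
      have ih2 := ih (e / 2) (Nat.div_lt_self (Nat.pos_of_ne_zero h0) one_lt_two)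
      by_cases hpar : e % 2 = 0
      · rw [if_pos hpar]
        refine ⟨pvMod_bounds _, ?_⟩
        rw [pvMod_castZ]
        push_cast
        rw [ih2.2, ← pow_add, show e / 2 + e / 2 = e from by omega]
      · rw [if_neg hpar]
        refine ⟨pvMod_bounds _, ?_⟩
        rw [pvMod_castZ]
        push_cast
        rw [pvMod_castZ]
        push_cast
        rw [ih2.2, ← pow_add, ← pow_succ, show e / 2 + e / 2 + 1 = e from by omega]

lemma fm_spec (k : Nat) :
    (0 ≤ fmChain k ∧ fmChain k < 104857601) ∧
    ((fmChain k : ZMod 104857601) = ((Nat.factorial k : Nat) : ZMod 104857601)) := by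
  induction k with
  | zero => exact ⟨⟨by norm_num [fmChain], by norm_num [fmChain]⟩, by norm_num [fmChain, Nat.factorial]⟩
  | succ k ih =>
    refine ⟨pvMod_bounds _, ?_⟩
    show ((PySem.Int.mod (fmChain k * ((k : Int) + 1)) pvMod : Int) : ZMod 104857601) = _
    rw [pvMod_castZ]
    push_cast
    rw [ih.2, Nat.factorial_succ]
    push_cast
    ring

lemma gv_spec (m : Nat) (hm : m < 104857601) : ∀ j : Nat, j ≤ m →
    (0 ≤ gvChain m j ∧ gvChain m j < 104857601) ∧
    ((gvChain m j : ZMod 104857601) * ((Nat.factorial (m - j) : Nat) : ZMod 104857601) = 1) := by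
  haveI : Fact (Nat.Prime 104857601) := ⟨pvP_prime⟩
  intro j
  induction j with
  | zero =>
    intro _
    refine ⟨(pow_spec (104857601 - 2) (fmChain m)).1, ?_⟩
    show ((pvPowMod (fmChain m) (104857601 - 2) pvMod : Int) : ZMod 104857601) * _ = 1
    rw [(pow_spec (104857601 - 2) (fmChain m)).2, (fm_spec m).2, Nat.sub_zero,
        ← pow_succ, show 104857601 - 2 + 1 = 104857601 - 1 from by norm_num]
    exact ZMod.pow_card_sub_one_eq_one (fact_ne_zero m hm)
  | succ j ih =>
    intro hj
    have ihh := ih (by omega)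
    refine ⟨pvMod_bounds _, ?_⟩
    show ((PySem.Int.mod (gvChain m j * ((m : Int) - (j : Int))) pvMod : Int) : ZMod 104857601) * _ = 1
    rw [pvMod_castZ]
    push_cast
    have hfs : (Nat.factorial (m - j) : Nat) = (m - j) * Nat.factorial (m - (j + 1)) := by
      rw [show m - j = (m - (j + 1)) + 1 from by omega, Nat.factorial_succ,
          show m - (j + 1) + 1 = m - j from by omega]
    have h2 := ihh.2
    rw [hfs] at h2
    push_cast [Nat.cast_sub (show j ≤ m from by omega)] at h2
    linear_combination h2

lemma bInv_spec (k : Nat) :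
    (0 ≤ bInv k ∧ bInv k < 104857601) ∧
    (1 ≤ k → k < 104857601 → (bInv k : ZMod 104857601) * ((k : Nat) : ZMod 104857601) = 1) := by
  induction k using Nat.strong_induction_on with
  | _ k ih =>
    match k with
    | 0 => exact ⟨⟨by norm_num [bInv], by norm_num [bInv]⟩, by omega⟩
    | 1 => refine ⟨⟨by norm_num [bInv], by norm_num [bInv]⟩, fun _ _ => by norm_num [bInv]⟩
    | (i + 2) =>
      rw [bInv_ge_two (i + 2) (by omega)]
      refine ⟨pvMod_bounds _, fun _ hk => ?_⟩
      set r := 104857601 % (i + 2) with hrdef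
      set q := 104857601 / (i + 2) with hqdef
      have hr0 : r ≠ 0 := by
        intro h0
        have hdvd : (i + 2) ∣ 104857601 := Nat.dvd_of_mod_eq_zero h0
        rcases (Nat.Prime.eq_one_or_self_of_dvd pvP_prime (i + 2) hdvd) with h | h <;> omega
      have hrlt : r < i + 2 := Nat.mod_lt _ (by omega)
      have ihr := (ih r (by omega)).2 (by omega) (by omega)
      have hsum : (q : ZMod 104857601) * ((i : ZMod 104857601) + 2) + (r : ZMod 104857601) = 0 := by
        have hqr : q * (i + 2) + r = 104857601 := by
          rw [hqdef, hrdef, Nat.mul_comm]; exact Nat.div_add_mod 104857601 (i + 2)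
        have hc : ((q * (i + 2) + r : Nat) : ZMod 104857601) = ((104857601 : Nat) : ZMod 104857601) := by
          rw [hqr]
        rw [ZMod.natCast_self] at hc
        push_cast at hc
        linear_combination hc
      show ((PySem.Int.mod ((pvMod - ((q : Nat) : Int)) * bInv r) pvMod : Int) : ZMod 104857601) * _ = 1
      rw [pvMod_castZ]
      have hp0 : ((pvMod : Int) : ZMod 104857601) = 0 := by
        show ((((104857601 : Nat) : Int)) : ZMod 104857601) = 0
        push_cast
        exact ZMod.natCast_self 104857601
      push_cast [hp0]
      linear_combination (-(bInv r : ZMod 104857601)) * hsum + ihr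

-- the two canonical forms agree elementwise (both list the inverses of 0..m, 0 ↦ 1)
lemma main_eq (m : Nat) (hm : m < 104857601) : finL m m = (List.range (m + 1)).map bInv := by
  apply List.ext_getElem
  · simp [finL]
  · intro k h1 h2
    have hk : k < m + 1 := by simpa [finL] using h1
    simp only [finL, List.getElem_map, List.getElem_range]
    by_cases hk1 : 1 ≤ k ∧ k ≤ m
    · rw [if_pos hk1]
      have hb := bInv_spec k
      have hg := gv_spec m hm (m - k) (by omega)
      refine castInj _ _ (pvMod_bounds _).1 (pvMod_bounds _).2 hb.1.1 hb.1.2 ?_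
      apply uniq_inv ((k : Nat) : ZMod 104857601) _ _ _ (hb.2 (by omega) (by omega))
      rw [pvMod_castZ]
      push_cast
      rw [(fm_spec (k - 1)).2]
      have hfs : (Nat.factorial k : Nat) = k * Nat.factorial (k - 1) := by
        rw [show k = (k - 1) + 1 from by omega, Nat.factorial_succ,
            show k - 1 + 1 = k from by omega]
      have h2 := hg.2
      rw [show m - (m - k) = k from by omega, hfs] at h2
      push_cast at h2
      linear_combination h2
    · have hk0 : k = 0 := by omega
      subst hk0
      rw [if_neg hk1, Nat.sub_zero]
      have hg := gv_spec m hm m le_rfl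
      have h2 := hg.2
      rw [Nat.sub_self, show Nat.factorial 0 = 1 from rfl] at h2
      push_cast at h2
      rw [mul_one] at h2
      show gvChain m m = bInv 0
      have hb0 : bInv 0 = 1 := by rw [bInv]
      rw [hb0]
      exact castInj _ _ hg.1.1 hg.1.2 (by norm_num) (by norm_num) (by rw [h2]; norm_num)

-- ===== VERDICT (by name: the statements are the Claim_ definitions above) =====
theorem compute_inverses_spec : Claim_equal_compute_inverses := by
  intro n _ hpre
  unfold Pre_compute_inverses at hpre
  unfold Spec_compute_inverses
  obtain ⟨m, rfl⟩ : ∃ m : Nat, n = (m : Int) := ⟨n.toNat, by omega⟩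
  rw [A_canon, B_canon, main_eq m (by exact_mod_cast hpre.2)]
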